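-- pv_equiv track=rewrite | github.com/richa92/Jenkin_Regression_Testing | robo4.2/fusion/tests/RIST/cdt/TrafficLib/vsp.py | _get_from_nic_list
-- ===== SOURCE A (Python) =====
-- def _get_from_nic_list(nic_list, mac_id, vlan_id):
--     """
--     Returns the list of NIC
--     :param nic_list:
--     :param mac_id:
--     :param vlan_id:
--     :return:
--     """
--     matches = list()
--     for ll in nic_list:
--         if ll['mac'].lower() == mac_id.lower():
--             matches.append(ll)
--
--     block = None
--     for ll in matches:
--         if ll['vlan'] == '':
--             block = ll
--             block['vlan'] = 'untagged'
--         elif str(ll['vlan']).lower() == str(vlan_id).lower():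
--             block = ll
--             break
--         else:
--             continue
--             # logger.warn("Error in nic mapping, please check {}".format(block))
--
--     return block
-- ===== SOURCE B (Python) =====
-- def _get_from_nic_list(nic_list, mac_id, vlan_id):
--     """Two independent declarative searches instead of a stateful scan:
--     first the exact (mac, vlan) match forward; failing that, the LAST
--     empty-vlan mac-match found by searching the reversed list, tagged
--     'untagged' once.  (A also mutates every intermediate empty-vlan match
--     in place; only the return value is claimed equivalent.)"""
--     mac = mac_id.lower()
--     want = str(vlan_id).lower()
--     hit = next((ll for ll in nic_list
--                 if ll['mac'].lower() == mac
--                 and ll['vlan'] != ''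
--                 and str(ll['vlan']).lower() == want), None)
--     if hit is not None:
--         return hit
--     empty = next((ll for ll in reversed(nic_list)
--                   if ll['mac'].lower() == mac and ll['vlan'] == ''), None)
--     if empty is not None:
--         empty['vlan'] = 'untagged'
--     return empty
-- ===== Notes on version B (the rewrite author's own statement) =====
-- stated objective: alternative
-- what changed: Replaces A's filter pass plus stateful break-loop with mutation-as-you-go by two independent declarative searches: a forward next() for the first exact vlan match, else a backward next() over reversed(nic_list) for the last empty-vlan mac-match, tagged 'untagged' once.
import Mathlib
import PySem

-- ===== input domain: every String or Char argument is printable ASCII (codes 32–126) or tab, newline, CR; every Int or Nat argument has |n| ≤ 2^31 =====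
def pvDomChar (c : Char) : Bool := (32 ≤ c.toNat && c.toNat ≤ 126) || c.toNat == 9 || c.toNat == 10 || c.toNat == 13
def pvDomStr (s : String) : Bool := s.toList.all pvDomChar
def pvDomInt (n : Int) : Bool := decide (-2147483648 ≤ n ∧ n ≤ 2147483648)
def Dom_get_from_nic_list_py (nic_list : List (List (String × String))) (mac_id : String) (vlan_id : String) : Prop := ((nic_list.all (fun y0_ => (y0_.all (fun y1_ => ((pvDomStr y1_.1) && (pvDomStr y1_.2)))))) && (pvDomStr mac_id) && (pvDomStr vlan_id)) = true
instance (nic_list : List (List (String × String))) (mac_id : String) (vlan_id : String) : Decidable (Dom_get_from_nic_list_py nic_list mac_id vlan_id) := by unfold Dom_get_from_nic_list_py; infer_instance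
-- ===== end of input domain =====

-- B replaces A's stateful break-loop by two independent searches (first exact vlan
-- match forward, else last empty-vlan mac-match via a reversed search, tagged once);
-- return-value equivalence only (A also mutates every intermediate empty-vlan match).


-- ===== PORT A =====
-- ll[k] on the assoc list (first match; "" only reached outside Pre_, where A raises KeyError)
def pvLookup (d : List (String × String)) (k : String) : String :=
  match d with
  | [] => ""
  | (k', v) :: rest => if k' == k then v else pvLookup rest k

-- ll[k] = v : overwrite the first binding in place, append if absent (Python dict assignment)
def pvSetKey (d : List (String × String)) (k v : String) : List (String × String) :=
  match d with
  | [] => [(k, v)]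
  | (k', v') :: rest => if k' == k then (k', v) :: rest else (k', v') :: pvSetKey rest k v

-- A's second loop over `matches`, with the running `block` and the break on a vlan match
def pvALoop (vlan_id : String) : List (List (String × String)) → Option (List (String × String)) → Option (List (String × String))
  | [], block => block
  | ll :: rest, block =>
    if pvLookup ll "vlan" == "" then
      pvALoop vlan_id rest (some (pvSetKey ll "vlan" "untagged"))
    else if PySem.Str.lower (pvLookup ll "vlan") == PySem.Str.lower vlan_id then
      some ll
    else
      pvALoop vlan_id rest block

def get_from_nic_list_py (nic_list : List (List (String × String))) (mac_id : String) (vlan_id : String) : Option (List (String × String)) :=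
  let ms := nic_list.foldl (fun acc ll =>
    if PySem.Str.lower (pvLookup ll "mac") == PySem.Str.lower mac_id then acc ++ [ll] else acc) []
  pvALoop vlan_id ms none

-- ===== PORT B =====
-- B's first search: exact (mac, vlan) match, forward
def pvHitP (mac want : String) (ll : List (String × String)) : Bool :=
  PySem.Str.lower (pvLookup ll "mac") == mac
    && pvLookup ll "vlan" != ""
    && PySem.Str.lower (pvLookup ll "vlan") == want

-- B's second search: empty-vlan mac-match (run over the reversed list)
def pvEmptyP (mac : String) (ll : List (String × String)) : Bool :=
  PySem.Str.lower (pvLookup ll "mac") == mac && pvLookup ll "vlan" == ""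

def get_from_nic_list_py_alt (nic_list : List (List (String × String))) (mac_id : String) (vlan_id : String) : Option (List (String × String)) :=
  let mac := PySem.Str.lower mac_id
  let want := PySem.Str.lower vlan_id
  match nic_list.find? (pvHitP mac want) with
  | some ll => some ll
  | none =>
    (nic_list.reverse.find? (pvEmptyP mac)).map (fun ll => pvSetKey ll "vlan" "untagged")

-- ===== PRECONDITION & SPEC =====
-- Pre_ excludes exactly the inputs on which A raises KeyError: an element without a
-- 'mac' key, or a mac-matching element without a 'vlan' key.
def Pre_get_from_nic_list_py (nic_list : List (List (String × String))) (mac_id : String) (vlan_id : String) : Prop :=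
  ∀ ll ∈ nic_list,
    (ll.any (fun p => p.1 == "mac")) = true ∧
    (PySem.Str.lower (pvLookup ll "mac") = PySem.Str.lower mac_id →
      (ll.any (fun p => p.1 == "vlan")) = true)
instance (nic_list : List (List (String × String))) (mac_id : String) (vlan_id : String) : Decidable (Pre_get_from_nic_list_py nic_list mac_id vlan_id) := by unfold Pre_get_from_nic_list_py; infer_instance
def pvWitness_get_from_nic_list_py : (List (List (String × String))) × String × String :=
  ([[("mac", "AA:01"), ("vlan", "")], [("mac", "aa:01"), ("vlan", "7")]], "Aa:01", "7")

def Spec_get_from_nic_list_py (nic_list : List (List (String × String))) (mac_id : String) (vlan_id : String) (out : Option (List (String × String))) : Prop := out = get_from_nic_list_py_alt nic_list mac_id vlan_id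
instance (nic_list : List (List (String × String))) (mac_id : String) (vlan_id : String) (out : Option (List (String × String))) : Decidable (Spec_get_from_nic_list_py nic_list mac_id vlan_id out) := by unfold Spec_get_from_nic_list_py; infer_instance

-- ===== CLAIM (what is proved, stated in full; the proofs are below) =====
def Claim_equal_get_from_nic_list_py : Prop := ∀ (nic_list : List (List (String × String))) (mac_id : String) (vlan_id : String), Dom_get_from_nic_list_py nic_list mac_id vlan_id → Pre_get_from_nic_list_py nic_list mac_id vlan_id → Spec_get_from_nic_list_py nic_list mac_id vlan_id (get_from_nic_list_py nic_list mac_id vlan_id)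

-- ===== LEMMAS AND PROOFS =====

-- A's first loop builds exactly the filter of the mac predicate.
theorem pv_foldl_filter (P : List (String × String) → Bool)
    (l : List (List (String × String))) (acc : List (List (String × String))) :
    l.foldl (fun acc ll => if P ll then acc ++ [ll] else acc) acc = acc ++ l.filter P := by
  induction l generalizing acc with
  | nil => simp
  | cons ll rest ih =>
    by_cases h : P ll = true <;> simp [List.foldl_cons, h, ih]

-- Invariant: A's stateful scan of the filtered list, carrying the already-tagged
-- candidate e.map tag, equals B's pair of searches with fallback e.map tag.
theorem pv_loop_eq (mac vlan_id : String)
    (l : List (List (String × String))) (e : Option (List (String × String))) :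
    pvALoop vlan_id (l.filter (fun ll => PySem.Str.lower (pvLookup ll "mac") == mac))
        (e.map (fun ll => pvSetKey ll "vlan" "untagged"))
      = match l.find? (pvHitP mac (PySem.Str.lower vlan_id)) with
        | some ll => some ll
        | none =>
          match l.reverse.find? (pvEmptyP mac) with
          | some x => some (pvSetKey x "vlan" "untagged")
          | none => e.map (fun ll => pvSetKey ll "vlan" "untagged") := by
  induction l generalizing e with
  | nil => cases e <;> simp [pvALoop]
  | cons ll rest ih =>
    by_cases hm : PySem.Str.lower (pvLookup ll "mac") = mac
    · by_cases hv : pvLookup ll "vlan" = ""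
      · have h1 := ih (some ll)
        simp only [Option.map_some] at h1
        simp only [List.filter_cons, hm, beq_self_eq_true, if_pos, List.find?_cons,
          pvHitP, pvEmptyP, hv, bne_self_eq_false, Bool.and_false, Bool.false_and,
          List.reverse_cons, List.find?_append]
        rw [pvALoop, if_pos (by simp [hv])]
        rw [h1]
        cases hfind : rest.find? (pvHitP mac (PySem.Str.lower vlan_id)) <;>
          cases hrev : rest.reverse.find? (pvEmptyP mac) <;>
            simp [beq_iff_eq]
      · by_cases hw : PySem.Str.lower (pvLookup ll "vlan") = PySem.Str.lower vlan_id
        · simp [pvALoop, pvHitP, hm, hv, hw]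
        · have h1 := ih e
          simp only [List.filter_cons, hm, beq_self_eq_true, if_pos, List.find?_cons,
            pvHitP, pvEmptyP, hv, hw, List.reverse_cons, List.find?_append]
          rw [pvALoop, if_neg (by simp [hv]), if_neg (by simp [hw])]
          rw [h1]
          have hb1 : (pvLookup ll "vlan" == "") = false := beq_eq_false_iff_ne.mpr hv
          have hb2 : (PySem.Str.lower (pvLookup ll "vlan") == PySem.Str.lower vlan_id) = false :=
            beq_eq_false_iff_ne.mpr hw
          cases hfind : rest.find? (pvHitP mac (PySem.Str.lower vlan_id)) <;>
            cases hrev : rest.reverse.find? (pvEmptyP mac) <;>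
              simp [hb1, hb2]
    · have h1 := ih e
      simp only [List.filter_cons, List.find?_cons, pvHitP, pvEmptyP,
        List.reverse_cons, List.find?_append]
      rw [if_neg (by simp [hm])]
      rw [h1]
      have hb : (PySem.Str.lower (pvLookup ll "mac") == mac) = false := beq_eq_false_iff_ne.mpr hm
      cases hfind : rest.find? (pvHitP mac (PySem.Str.lower vlan_id)) <;>
        cases hrev : rest.reverse.find? (pvEmptyP mac) <;>
          simp [hb]

-- ===== VERDICT (by name: the statement is the Claim_ definition above) =====
theorem get_from_nic_list_py_spec : Claim_equal_get_from_nic_list_py := by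
  intro nic_list mac_id vlan_id _ _
  unfold Spec_get_from_nic_list_py get_from_nic_list_py get_from_nic_list_py_alt
  have h := pv_loop_eq (PySem.Str.lower mac_id) vlan_id nic_list none
  simp only [Option.map_none] at h
  simp only [pv_foldl_filter, List.nil_append]
  rw [h]
  cases hf : nic_list.find? (pvHitP (PySem.Str.lower mac_id) (PySem.Str.lower vlan_id)) <;>
    cases hr : nic_list.reverse.find? (pvEmptyP (PySem.Str.lower mac_id)) <;> simp
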